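-- pv_equiv track=rewrite | github.com/cthomason/keyboard-py | utils.py | createKeyboard
-- ===== SOURCE A (Python) =====
-- def createKeyboard(alphabet, row_length):
--   # dictionary for fast lookup of locations
--   lookup = {}
--   # use a list to hold the actual graph
--   graph = []
--   # use a list to hold each row of the keyboard
--   row = []
--   # keep track of the x,y coordinates of each letter
--   x = 0
--   y = 0
--
--   # time to build the keyboard
--   for index, letter in enumerate(alphabet):
--
--     if index != 0 and index % row_length == 0:
--       x = 0
--       y += 1
--       graph.append(row)
--       row = []
--
--     lookup[letter] = [x,y]
--     row.append(letter)
--     x += 1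
--
--   # Don't forget the last row
--   graph.append(row)
--
--   # return the lookup table and the graph we've built
--   return (lookup, graph)
-- ===== SOURCE B (Python) =====
-- def createKeyboard(alphabet, row_length):
--   # Coordinates in closed form: letter at index i sits at column i % row_length,
--   # row i // row_length; the grid is the alphabet cut into consecutive chunks.
--   letters = list(alphabet)
--   lookup = {letter: [i % row_length, i // row_length]
--             for i, letter in enumerate(letters)}
--   graph = [letters[i:i + row_length]
--            for i in range(0, len(letters), row_length)] or [[]]
--   return (lookup, graph)
-- ===== Notes on version B (the rewrite author's own statement) =====
-- stated objective: simpler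
-- what changed: Replaces the running x/y counters with the closed form (i % row_length, i // row_length), builds the lookup in one dict comprehension, and builds the grid by slicing the alphabet into consecutive chunks instead of accumulating rows with an in-loop row-break test.
-- outside the precondition, e.g. on createKeyboard('a', 0): A returns ({'a': [0, 0]}, [['a']]), B raises ZeroDivisionError
import Mathlib
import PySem

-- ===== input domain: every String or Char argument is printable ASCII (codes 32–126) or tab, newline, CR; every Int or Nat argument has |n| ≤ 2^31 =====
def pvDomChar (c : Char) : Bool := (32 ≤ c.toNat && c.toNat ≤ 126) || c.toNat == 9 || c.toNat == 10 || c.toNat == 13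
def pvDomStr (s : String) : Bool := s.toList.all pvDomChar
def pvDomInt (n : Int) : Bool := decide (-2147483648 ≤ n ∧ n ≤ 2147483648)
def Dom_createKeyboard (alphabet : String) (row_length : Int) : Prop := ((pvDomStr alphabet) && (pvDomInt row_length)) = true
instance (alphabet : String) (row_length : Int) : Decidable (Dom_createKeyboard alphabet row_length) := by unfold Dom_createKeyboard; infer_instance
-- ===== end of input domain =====

-- B computes each letter's coordinates in closed form (i % row_length, i // row_length) and builds the
-- grid by slicing the alphabet into consecutive chunks, instead of A's running x/y counters with an
-- in-loop row-break test (objective: simpler).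


-- ===== PORT A =====
def ckStep (row_length : Int)
    (st : PySem.Dict String (List Int) × List (List String) × List String × Int × Int)
    (p : Int × Char) :
    PySem.Dict String (List Int) × List (List String) × List String × Int × Int :=
  let s1 : List (List String) × List String × Int × Int :=
    if p.1 ≠ 0 ∧ PySem.Int.mod p.1 row_length = 0 then
      (st.2.1 ++ [st.2.2.1], ([] : List String), (0 : Int), st.2.2.2.2 + 1)
    else
      (st.2.1, st.2.2.1, st.2.2.2.1, st.2.2.2.2)
  (st.1.insert (String.ofList [p.2]) [s1.2.2.1, s1.2.2.2], s1.1, s1.2.1 ++ [String.ofList [p.2]], s1.2.2.1 + 1, s1.2.2.2)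

def createKeyboard (alphabet : String) (row_length : Int) : (List (String × List Int)) × List (List String) :=
  let final := (PySem.List.enumerate alphabet.toList 0).foldl (ckStep row_length)
    (PySem.Dict.empty, ([] : List (List String)), ([] : List String), (0 : Int), (0 : Int))
  (final.1.items, final.2.1 ++ [final.2.2.1])

-- ===== PORT B =====
def createKeyboard_alt (alphabet : String) (row_length : Int) : (List (String × List Int)) × List (List String) :=
  let letters := alphabet.toList.map (fun c => String.ofList [c])
  let lookup := (PySem.List.enumerate letters 0).foldl
    (fun (d : PySem.Dict String (List Int)) p =>
      d.insert p.2 [PySem.Int.mod p.1 row_length, PySem.Int.floordiv p.1 row_length])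
    PySem.Dict.empty
  let chunksL := (PySem.List.pyRange 0 (PySem.List.len letters) row_length).map
    (fun i => PySem.List.slice letters (some i) (some (i + row_length)))
  let graph := if chunksL.isEmpty then [([] : List String)] else chunksL
  (lookup.items, graph)

-- ===== PRECONDITION & SPEC =====
-- Pre_ restricts to positive row_length, the function's natural domain: with row_length = 0 A raises
-- ZeroDivisionError as soon as the alphabet has two letters (and B always), and a negative row_length is
-- not a meaningful row width (A happens to return rows of width |row_length| there, B does not match it).
def Pre_createKeyboard (alphabet : String) (row_length : Int) : Prop := 1 ≤ row_length
instance (alphabet : String) (row_length : Int) : Decidable (Pre_createKeyboard alphabet row_length) := by unfold Pre_createKeyboard; infer_instance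
def pvWitness_createKeyboard : String × Int := ("qwerty", 3)
def Spec_createKeyboard (alphabet : String) (row_length : Int) (out : (List (String × List Int)) × List (List String)) : Prop := out = createKeyboard_alt alphabet row_length
instance (alphabet : String) (row_length : Int) (out : (List (String × List Int)) × List (List String)) : Decidable (Spec_createKeyboard alphabet row_length out) := by unfold Spec_createKeyboard; infer_instance

-- ===== CLAIM (what is proved, stated in full; the proofs are below) =====
def Claim_equal_createKeyboard : Prop := ∀ (alphabet : String) (row_length : Int), Dom_createKeyboard alphabet row_length → Pre_createKeyboard alphabet row_length → Spec_createKeyboard alphabet row_length (createKeyboard alphabet row_length)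

-- ===== LEMMAS AND PROOFS =====
-- the grid cut into consecutive chunks of size r1+1 (trailing partial chunk included)
def chunksS (r1 : Nat) (l : List String) : List (List String) :=
  match l with
  | [] => []
  | x :: xs => ((x :: xs).take (r1 + 1)) :: chunksS r1 ((x :: xs).drop (r1 + 1))
termination_by l.length
decreasing_by simp
-- the lookup dict after inserting letters cs starting at index s, with closed-form coordinates
def insFrom (r : Nat) (d : PySem.Dict String (List Int)) (s : Nat) : List Char → PySem.Dict String (List Int)
  | [] => d
  | c :: cs => insFrom r (d.insert (String.ofList [c]) [((s % r : Nat) : Int), ((s / r : Nat) : Int)]) (s + 1) cs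

theorem lookupB_eq (r : Nat) :
    ∀ (cs : List Char) (s : Nat) (d : PySem.Dict String (List Int)),
    (PySem.List.enumerate (cs.map (fun c => String.ofList [c])) (s : Int)).foldl
      (fun (d : PySem.Dict String (List Int)) p =>
        d.insert p.2 [PySem.Int.mod p.1 (r : Int), PySem.Int.floordiv p.1 (r : Int)]) d
    = insFrom r d s cs := by
  intro cs
  induction cs with
  | nil => intro s d; simp [insFrom, PySem.List.enumerate_nil]
  | cons c cs ih =>
    intro s d
    rw [List.map_cons, PySem.List.enumerate_cons, List.foldl_cons]
    have h1 : ((s : Int) + 1) = ((s + 1 : Nat) : Int) := by push_cast; ring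
    rw [h1, ih]
    simp [insFrom, PySem.Int.mod_natCast, PySem.Int.floordiv_natCast]

theorem chunks_cnt (r : Nat) (hr : 1 ≤ r) :
    ∀ (n : Nat) (ls : List String), ls.length ≤ n →
    (List.range ((ls.length + r - 1) / r)).map (fun k => (ls.drop (r * k)).take r)
    = chunksS (r - 1) ls := by
  intro n
  induction n with
  | zero =>
    intro ls h
    have : ls = [] := List.length_eq_zero_iff.mp (Nat.le_zero.mp h)
    subst this
    have : (0 + r - 1) / r = 0 := Nat.div_eq_of_lt (by omega)
    simp [chunksS]
    omega
  | succ n ih =>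
    intro ls h
    match ls with
    | [] =>
      have : (0 + r - 1) / r = 0 := Nat.div_eq_of_lt (by omega)
      simp [chunksS]
      omega
    | x :: xs =>
      set L := (x :: xs).length with hL
      have hL1 : 1 ≤ L := by simp [hL]
      have hstep : chunksS (r - 1) (x :: xs)
          = ((x :: xs).take r) :: chunksS (r - 1) ((x :: xs).drop r) := by
        rw [chunksS]
        have : r - 1 + 1 = r := by omega
        rw [this]
      rw [hstep]
      have hm : (L + r - 1) / r = (L - r + r - 1) / r + 1 := by
        rcases Nat.lt_or_ge L (r + 1) with hc | hc
        · have h1 : (L + r - 1) / r = 1 := by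
            have := Nat.div_eq_of_lt_le (by omega : 1 * r ≤ L + r - 1) (by omega : L + r - 1 < (1+1) * r)
            simpa using this
          have h2 : (L - r + r - 1) / r = 0 := Nat.div_eq_of_lt (by omega)
          omega
        · have h1 : L + r - 1 = (L - r + r - 1) + r := by omega
          rw [h1, Nat.add_div_right _ (by omega)]
      rw [hm, List.range_succ_eq_map, List.map_cons, List.map_map]
      refine congrArg₂ List.cons ?_ ?_
      · norm_num
      · have hdl : ((x :: xs).drop r).length = L - r := by simp [hL]
        have hih := ih ((x :: xs).drop r) (by have h' : (x :: xs).length ≤ n + 1 := hL ▸ h; simp only [List.length_drop]; omega)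
        rw [hdl] at hih
        rw [← hih]
        apply List.map_congr_left
        intro k _
        simp only [Function.comp_apply, List.drop_drop, Nat.succ_eq_add_one]
        rw [Nat.mul_add, Nat.mul_one, Nat.add_comm]

theorem graphB_eq (r : Nat) (hr : 1 ≤ r) (ls : List String) :
    (PySem.List.pyRange 0 (PySem.List.len ls) (r : Int)).map
      (fun i => PySem.List.slice ls (some i) (some (i + (r : Int))))
    = chunksS (r - 1) ls := by
  rw [PySem.List.len_eq, PySem.List.pyRange_of_pos _ _ (by exact_mod_cast hr : (0:Int) < (r:Int))]
  match ls with
  | [] => simp [chunksS]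
  | x :: xs =>
    set L := (x :: xs).length with hL
    have hL1 : 1 ≤ L := by simp [hL]
    rw [if_pos (by exact_mod_cast hL1 : (0:Int) < (L:Int))]
    have hm : (((L : Int) - 0 + (r : Int) - 1) / (r : Int)).toNat = (L + r - 1) / r := by
      have h1 : ((L : Int) - 0 + (r : Int) - 1) = ((L + r - 1 : Nat) : Int) := by
        push_cast [Nat.cast_sub (by omega : 1 ≤ L + r)]; ring
      rw [h1, ← Int.natCast_div, Int.toNat_natCast]
    rw [hm, List.map_map, ← chunks_cnt r hr L (x :: xs) (le_of_eq hL.symm)]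
    apply List.map_congr_left
    intro k _
    simp only [Function.comp_apply]
    have h2 : (0 : Int) + (r : Int) * (k : Int) = ((r * k : Nat) : Int) := by push_cast; ring
    rw [h2, PySem.List.slice_natCast_add]

theorem mainA (r : Nat) (hr : 1 ≤ r) :
    ∀ (cs : List Char) (q x : Nat) (L : PySem.Dict String (List Int))
      (G : List (List String)) (R : List String), 1 ≤ x → x ≤ r →
    (let st := (PySem.List.enumerate cs ((q * r + x : Nat) : Int)).foldl (ckStep (r : Int)) (L, G, R, ((x : Nat) : Int), ((q : Nat) : Int));
     (st.1, st.2.1 ++ [st.2.2.1]))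
    = (insFrom r L (q * r + x) cs,
       G ++ ((R ++ (cs.take (r - x)).map (fun c => String.ofList [c]))
             :: chunksS (r - 1) ((cs.drop (r - x)).map (fun c => String.ofList [c])))) := by
  intro cs
  induction cs with
  | nil =>
    intro q x L G R hx1 hx2
    simp [PySem.List.enumerate_nil, insFrom, chunksS]
  | cons c cs ih =>
    intro q x L G R hx1 hx2
    rw [PySem.List.enumerate_cons, List.foldl_cons]
    rcases Nat.lt_or_ge x r with hxr | hxr
    -- x < r : no row break
    · have hcond : ¬ (((q * r + x : Nat) : Int) ≠ 0 ∧ PySem.Int.mod ((q * r + x : Nat) : Int) (r : Int) = 0) := by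
        rintro ⟨-, hmod⟩
        rw [PySem.Int.mod_natCast] at hmod
        have : (q * r + x) % r = x := by
          rw [Nat.add_comm, Nat.add_mul_mod_self_right, Nat.mod_eq_of_lt hxr]
        omega
      have hstep : ckStep (r : Int) (L, G, R, ((x : Nat) : Int), ((q : Nat) : Int)) (((q * r + x : Nat) : Int), c)
          = (L.insert (String.ofList [c]) [((x : Nat) : Int), ((q : Nat) : Int)], G, R ++ [String.ofList [c]], ((x : Nat) : Int) + 1, ((q : Nat) : Int)) := by
        simp only [ckStep, if_neg hcond]
      rw [hstep]
      have harg : ((q * r + x : Nat) : Int) + 1 = ((q * r + (x + 1) : Nat) : Int) := by push_cast; ring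
      have hxc : ((x : Nat) : Int) + 1 = (((x + 1 : Nat)) : Int) := by push_cast; ring
      rw [harg, hxc, ih q (x + 1) _ G (R ++ [String.ofList [c]]) (by omega) (by omega)]
      rw [Prod.mk.injEq]
      constructor
      · -- lookup side
        have hmodv : (q * r + x) % r = x := by
          rw [Nat.add_comm, Nat.add_mul_mod_self_right, Nat.mod_eq_of_lt hxr]
        have hdivv : (q * r + x) / r = q := by
          rw [Nat.add_comm, Nat.add_mul_div_right _ _ (by omega : 0 < r), Nat.div_eq_of_lt hxr]; omega
        have hs : q * r + (x + 1) = (q * r + x) + 1 := by ring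
        rw [insFrom, hmodv, hdivv, hs]
      · -- graph side
        show G ++ _ = G ++ _
        congr 1
        have htk : (c :: cs).take (r - x) = c :: cs.take (r - (x + 1)) := by
          have : r - x = (r - (x + 1)) + 1 := by omega
          rw [this, List.take_succ_cons]
        have hdr : (c :: cs).drop (r - x) = cs.drop (r - (x + 1)) := by
          have : r - x = (r - (x + 1)) + 1 := by omega
          rw [this, List.drop_succ_cons]
        rw [htk, hdr, List.map_cons]
        simp
    -- x = r : row break fires
    · have hxe : x = r := by omega
      rw [hxe]
      have hcond : (((q * r + r : Nat) : Int) ≠ 0 ∧ PySem.Int.mod ((q * r + r : Nat) : Int) (r : Int) = 0) := by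
        constructor
        · have : 1 ≤ q * r + r := by omega
          exact_mod_cast (by omega : ((q * r + r : Nat) : Int) ≠ 0)
        · rw [PySem.Int.mod_natCast]
          have : (q * r + r) % r = 0 := by
            rw [show q * r + r = (q + 1) * r by ring]
            exact Nat.mul_mod_left _ _
          rw [this]; rfl
      have hstep : ckStep (r : Int) (L, G, R, ((r : Nat) : Int), ((q : Nat) : Int)) (((q * r + r : Nat) : Int), c)
          = (L.insert (String.ofList [c]) [(0 : Int), ((q : Nat) : Int) + 1], G ++ [R], [String.ofList [c]], (0 : Int) + 1, ((q : Nat) : Int) + 1) := by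
        simp only [ckStep, if_pos hcond]
        rfl
      rw [hstep]
      have harg : ((q * r + r : Nat) : Int) + 1 = (((q + 1) * r + 1 : Nat) : Int) := by push_cast; ring
      have h01 : (0 : Int) + 1 = ((1 : Nat) : Int) := by norm_num
      have hq1 : ((q : Nat) : Int) + 1 = (((q + 1) : Nat) : Int) := by push_cast; ring
      rw [harg, h01, hq1, ih (q + 1) 1 _ (G ++ [R]) [String.ofList [c]] (by omega) (by omega)]
      rw [Prod.mk.injEq]
      constructor
      · have hmodv : (q * r + r) % r = 0 := by
          rw [show q * r + r = (q + 1) * r by ring]; exact Nat.mul_mod_left _ _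
        have hdivv : (q * r + r) / r = q + 1 := by
          rw [show q * r + r = (q + 1) * r by ring]; exact Nat.mul_div_cancel _ (by omega : 0 < r)
        have hs : (q + 1) * r + 1 = (q * r + r) + 1 := by ring
        rw [insFrom, hmodv, hdivv, hs]
        norm_num
      · show (G ++ [R]) ++ _ = G ++ _
        rw [List.append_assoc]
        congr 1
        show [R] ++ _ = _
        have htk : (c :: cs).take (r - r) = [] := by simp
        have hdr : (c :: cs).drop (r - r) = c :: cs := by simp
        rw [htk, hdr, List.map_cons]
        rw [chunksS]
        have hr1 : r - 1 + 1 = r := by omega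
        rw [hr1]
        have htk2 : (String.ofList [c] :: cs.map (fun c => String.ofList [c])).take r
            = String.ofList [c] :: (cs.map (fun c => String.ofList [c])).take (r - 1) := by
          rw [show r = (r - 1) + 1 by omega, List.take_succ_cons]
          simp
        have hdr2 : (String.ofList [c] :: cs.map (fun c => String.ofList [c])).drop r
            = (cs.map (fun c => String.ofList [c])).drop (r - 1) := by
          rw [show r = (r - 1) + 1 by omega, List.drop_succ_cons]
          simp
        rw [htk2, hdr2]
        simp [List.map_take, List.map_drop]

theorem ports_agree (alphabet : String) (rl : Int) (hpre : 1 ≤ rl) :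
    createKeyboard alphabet rl = createKeyboard_alt alphabet rl := by
  have hrl : rl = (rl.toNat : Int) := (Int.toNat_of_nonneg (by omega)).symm
  set r := rl.toNat with hrdef
  have hr : 1 ≤ r := by omega
  rw [hrl]
  unfold createKeyboard createKeyboard_alt
  cases hcs : alphabet.toList with
  | nil =>
    simp only [List.map_nil, PySem.List.enumerate_nil, List.foldl_nil]
    rw [PySem.List.len_eq, PySem.List.pyRange_of_pos _ _ (by exact_mod_cast hr : (0:Int) < (r:Int))]
    simp
  | cons c cs =>
    simp only [List.map_cons]
    rw [PySem.List.enumerate_cons, List.foldl_cons, PySem.List.enumerate_cons]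
    -- first iteration of A's loop (index 0: no row break)
    have hstep0 : ckStep (r : Int) (PySem.Dict.empty, ([] : List (List String)), ([] : List String), (0 : Int), (0 : Int)) (0, c)
        = (PySem.Dict.empty.insert (String.ofList [c]) [(0 : Int), (0 : Int)], [], [String.ofList [c]], (0 : Int) + 1, (0 : Int)) := by
      simp [ckStep]
    rw [hstep0]
    -- A's remaining loop via mainA
    have hA := mainA r hr cs 0 1 (PySem.Dict.empty.insert (String.ofList [c]) [(0:Int), (0:Int)])
      [] [String.ofList [c]] le_rfl hr
    push_cast at hA
    norm_num at hA
    -- B's lookup in closed form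
    have hB := lookupB_eq r (c :: cs) 0 PySem.Dict.empty
    norm_num at hB
    rw [PySem.Int.mod_eq_emod_of_pos (b := (r:Int)) (a := 0) (by exact_mod_cast hr),
        PySem.Int.floordiv_eq_ediv_of_pos (b := (r:Int)) (a := 0) (by exact_mod_cast hr)] at hB
    norm_num at hB
    have hB2 : insFrom r PySem.Dict.empty 0 (c :: cs)
        = insFrom r (PySem.Dict.empty.insert (String.ofList [c]) [(0:Int), (0:Int)]) 1 cs := by
      rw [insFrom]
      norm_num
    -- B's graph in chunk form
    have hG := graphB_eq r hr (String.ofList [c] :: cs.map (fun c => String.ofList [c]))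
    rw [hG, chunksS]
    have hr1 : r - 1 + 1 = r := by omega
    rw [hr1]
    norm_num
    constructor
    · rw [hA.1]
      rw [PySem.Int.mod_eq_emod_of_pos (b := (r:Int)) (a := 0) (by exact_mod_cast hr),
          PySem.Int.floordiv_eq_ediv_of_pos (b := (r:Int)) (a := 0) (by exact_mod_cast hr)]
      norm_num
      rw [hB, hB2]
    · rw [hA.2]
      have htk2 : (String.ofList [c] :: cs.map (fun c => String.ofList [c])).take r
          = String.ofList [c] :: (cs.map (fun c => String.ofList [c])).take (r - 1) := by
        rw [show r = (r - 1) + 1 by omega, List.take_succ_cons]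
        simp
      have hdr2 : (String.ofList [c] :: cs.map (fun c => String.ofList [c])).drop r
          = (cs.map (fun c => String.ofList [c])).drop (r - 1) := by
        rw [show r = (r - 1) + 1 by omega, List.drop_succ_cons]
        simp
      rw [htk2, hdr2]

-- ===== VERDICT (by name: the statement is the Claim_ definition above) =====
theorem createKeyboard_spec : Claim_equal_createKeyboard := by
  intro alphabet row_length _ hpre
  unfold Spec_createKeyboard
  exact ports_agree alphabet row_length hpre
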